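-- pv_equiv track=rewrite | github.com/dantyrr/IMPACT-gender | src/pipeline/pubmed_fetcher.py | _classify_pub_type
-- ===== SOURCE A (Python) =====
-- from typing import List, Dict, Optional
--
-- def _classify_pub_type(pub_types: List[str]) -> str:
--     """
--     Classify a paper based on its PubMed publication types.
--     Priority: Review > Editorial > Letter > Journal Article
--     """
--     review_types = {
--         "Review", "Systematic Review", "Meta-Analysis",
--         "Practice Guideline", "Guideline", "Consensus Development Conference",
--     }
--     non_research = {
--         "Editorial", "Letter", "Comment", "Published Erratum",
--         "Retraction of Publication", "News",
--     }
--
--     for pt in pub_types: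
--         if pt in review_types:
--             return "Review"
--     for pt in pub_types:
--         if pt in non_research:
--             return pt
--     if "Journal Article" in pub_types:
--         return "Journal Article"
--     return pub_types[0] if pub_types else "Unknown"
-- ===== SOURCE B (Python) =====
-- def _classify_pub_type(pub_types):
--     """Single pass over pub_types accumulating state, then resolve priority."""
--     review_types = {
--         "Review", "Systematic Review", "Meta-Analysis",
--         "Practice Guideline", "Guideline", "Consensus Development Conference",
--     }
--     non_research = {
--         "Editorial", "Letter", "Comment", "Published Erratum",
--         "Retraction of Publication", "News",
--     }
--     has_review = False
--     first_non_research = None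
--     has_journal = False
--     for pt in pub_types:
--         if pt in review_types:
--             has_review = True
--         if first_non_research is None and pt in non_research:
--             first_non_research = pt
--         if pt == "Journal Article":
--             has_journal = True
--     if has_review:
--         return "Review"
--     if first_non_research is not None:
--         return first_non_research
--     if has_journal:
--         return "Journal Article"
--     return pub_types[0] if pub_types else "Unknown"
-- ===== Notes on version B (the rewrite author's own statement) =====
-- stated objective: alternative
-- what changed: Replaced A's three separate scans (early-return review scan, early-return non-research scan, membership test) with one accumulator loop over pub_types that records has_review, the first non-research hit and a Journal Article flag, resolving the priority once after the loop.
import Mathlib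
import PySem

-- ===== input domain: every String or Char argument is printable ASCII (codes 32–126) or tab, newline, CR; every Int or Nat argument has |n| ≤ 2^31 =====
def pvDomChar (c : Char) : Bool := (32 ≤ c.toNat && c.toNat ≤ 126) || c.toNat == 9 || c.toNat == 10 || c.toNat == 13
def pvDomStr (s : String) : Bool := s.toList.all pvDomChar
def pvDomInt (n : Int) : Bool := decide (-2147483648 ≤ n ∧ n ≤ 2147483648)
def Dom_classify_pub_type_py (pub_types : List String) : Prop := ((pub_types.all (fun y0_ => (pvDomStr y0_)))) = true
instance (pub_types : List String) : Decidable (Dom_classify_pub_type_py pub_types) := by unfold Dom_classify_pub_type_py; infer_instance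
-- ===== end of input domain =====

-- B replaces A's three early-return scans with a single accumulator pass resolved after the loop (alternative decomposition, same O(n) cost).


-- ===== PORT A =====
-- A: three scans with early return — literal transliteration of each loop.
def pvReviewTypes : PySem.Set String := PySem.Set.ofList
  ["Review", "Systematic Review", "Meta-Analysis",
   "Practice Guideline", "Guideline", "Consensus Development Conference"]

def pvNonResearch : PySem.Set String := PySem.Set.ofList
  ["Editorial", "Letter", "Comment", "Published Erratum",
   "Retraction of Publication", "News"]

-- first loop of A: return "Review" on first hit
def pvLoopReview : List String → Option String
  | [] => none
  | pt :: rest => if pvReviewTypes.contains pt then some "Review" else pvLoopReview rest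

-- second loop of A: return the first non-research type hit
def pvLoopNonResearch : List String → Option String
  | [] => none
  | pt :: rest => if pvNonResearch.contains pt then some pt else pvLoopNonResearch rest

def classify_pub_type_py (pub_types : List String) : String :=
  match pvLoopReview pub_types with
  | some s => s
  | none =>
    match pvLoopNonResearch pub_types with
    | some s => s
    | none =>
      if pub_types.contains "Journal Article" then "Journal Article"
      else match pub_types with
        | [] => "Unknown"
        | x :: _ => x

-- ===== PORT B =====
-- B: one accumulator pass (has_review, first_non_research, has_journal), then resolve.
def pvStep (st : Bool × Option String × Bool) (pt : String) : Bool × Option String × Bool :=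
  ( st.1 || pvReviewTypes.contains pt
  , if st.2.1.isNone && pvNonResearch.contains pt then some pt else st.2.1
  , st.2.2 || (pt == "Journal Article") )

def classify_pub_type_py_alt (pub_types : List String) : String :=
  let st := pub_types.foldl pvStep (false, none, false)
  if st.1 then "Review"
  else match st.2.1 with
    | some s => s
    | none =>
      if st.2.2 then "Journal Article"
      else match pub_types with
        | [] => "Unknown"
        | x :: _ => x

-- ===== PRECONDITION & SPEC =====
def Spec_classify_pub_type_py (pub_types : List String) (out : String) : Prop := out = classify_pub_type_py_alt pub_types
instance (pub_types : List String) (out : String) : Decidable (Spec_classify_pub_type_py pub_types out) := by unfold Spec_classify_pub_type_py; infer_instance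

-- ===== CLAIM (what is proved, stated in full; the proofs are below) =====
def Claim_equal_classify_pub_type_py : Prop := ∀ (pub_types : List String), Dom_classify_pub_type_py pub_types → Spec_classify_pub_type_py pub_types (classify_pub_type_py pub_types)

-- ===== LEMMAS AND PROOFS =====
theorem pvFold_fst (l : List String) (a : Bool) (b : Option String) (c : Bool) :
    (l.foldl pvStep (a, b, c)).1 = (a || l.any (fun pt => pvReviewTypes.contains pt)) := by
  induction l generalizing a b c with
  | nil => simp
  | cons x xs ih => simp [pvStep, ih, Bool.or_assoc]

theorem pvFold_snd (l : List String) (a : Bool) (b : Option String) (c : Bool) :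
    (l.foldl pvStep (a, b, c)).2.1 =
      (match b with | some s => some s | none => pvLoopNonResearch l) := by
  induction l generalizing a b c with
  | nil => cases b <;> simp [pvLoopNonResearch]
  | cons x xs ih =>
    cases b with
    | some s => simp [pvStep, ih]
    | none =>
      by_cases h : x ∈ pvNonResearch <;>
        simp [pvStep, h, ih, pvLoopNonResearch]

theorem pvFold_trd (l : List String) (a : Bool) (b : Option String) (c : Bool) :
    (l.foldl pvStep (a, b, c)).2.2 = (c || l.any (fun pt => pt == "Journal Article")) := by
  induction l generalizing a b c with
  | nil => simp
  | cons x xs ih => simp [pvStep, ih, Bool.or_assoc]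

theorem pvLoopReview_eq (l : List String) :
    pvLoopReview l = (if l.any (fun pt => pvReviewTypes.contains pt) then some "Review" else none) := by
  induction l with
  | nil => simp [pvLoopReview]
  | cons x xs ih =>
    by_cases h : x ∈ pvReviewTypes <;> simp [pvLoopReview, h, ih]

theorem pvContains_eq (l : List String) :
    l.contains "Journal Article" = l.any (fun pt => pt == "Journal Article") := by
  induction l with
  | nil => simp
  | cons x xs ih => rw [List.contains_cons, List.any_cons, ih, BEq.comm]

-- ===== VERDICT (by name: the statement is the Claim_ definition above) =====
theorem classify_pub_type_py_spec : Claim_equal_classify_pub_type_py := by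
  intro pub_types _
  unfold Spec_classify_pub_type_py classify_pub_type_py classify_pub_type_py_alt
  simp only [pvFold_fst, pvFold_snd, pvFold_trd, pvLoopReview_eq, pvContains_eq, Bool.false_or]
  by_cases hr : pub_types.any (fun pt => pvReviewTypes.contains pt) <;>
    simp only [hr, if_true] <;>
    cases hnr : pvLoopNonResearch pub_types <;> simp
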